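-- pv_equiv track=rewrite | github.com/Cheroketo/python_practice | basics/first_letter_frequency.py | first_letter_frequency
-- ===== SOURCE A (Python) =====
-- def first_letter_frequency(words_lst):
--     dict_result = {}
--     for word in words_lst:
--         first_letter = word[:1]
--         if first_letter in dict_result:
--             dict_result[first_letter] += 1
--         else:
--             dict_result[first_letter] = 1
--     return dict_result
-- ===== SOURCE B (Python) =====
-- def first_letter_frequency(words_lst):
--     # recursive partition: peel off the head word's first letter, count its whole
--     # group by what filtering it away removes, then recurse on the remaining words
--     if not words_lst:
--         return {}
--     k = words_lst[0][:1]
--     rest = [w for w in words_lst if w[:1] != k]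
--     result = {k: len(words_lst) - len(rest)}
--     result.update(first_letter_frequency(rest))
--     return result
-- ===== Notes on version B (the rewrite author's own statement) =====
-- stated objective: alternative
-- what changed: Replaces A's single-pass dict accumulation with a recursive partition scheme: take the head word's first letter, count its group as the number of words that filtering it away removes, and recurse on the filtered remainder, so no mutable counter dict is maintained.
import Mathlib
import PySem

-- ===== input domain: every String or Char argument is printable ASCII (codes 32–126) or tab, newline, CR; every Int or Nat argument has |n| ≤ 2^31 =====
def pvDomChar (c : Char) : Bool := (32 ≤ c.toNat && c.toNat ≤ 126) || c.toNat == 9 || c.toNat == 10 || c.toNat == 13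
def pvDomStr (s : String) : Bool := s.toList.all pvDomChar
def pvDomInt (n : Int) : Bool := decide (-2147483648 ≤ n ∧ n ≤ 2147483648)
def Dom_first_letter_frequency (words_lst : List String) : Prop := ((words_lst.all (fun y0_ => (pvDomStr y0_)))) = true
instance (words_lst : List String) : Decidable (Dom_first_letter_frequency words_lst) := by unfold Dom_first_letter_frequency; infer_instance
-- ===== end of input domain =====

-- B replaces A's single-pass dict accumulation by a recursive partition: peel off the head word's
-- first letter, count its group by what filtering it away removes, and recurse on the remainder.

-- ===== PORT A =====
-- literal port of A: fold over the words, maintaining an insertion-ordered dict of counts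
def first_letter_frequency (words_lst : List String) : List (String × Int) :=
  (words_lst.foldl
    (fun (d : PySem.Dict String Int) (word : String) =>
      let first_letter := PySem.Str.slice word none (some 1)
      if d.contains first_letter then d.modify first_letter 0 (· + 1)
      else d.insert first_letter 1)
    PySem.Dict.empty).items

-- ===== PORT B =====
-- port of B: recursive partition — head's first letter, its count = how many words the filter removes,
-- then recurse on the filtered remainder (the dict-update appends, since the key is gone from rest)
def first_letter_frequency_alt : List String → List (String × Int)
  | [] => []
  | w :: ws =>
    let k := PySem.Str.slice w none (some 1)
    let rest := (w :: ws).filter (fun v => PySem.Str.slice v none (some 1) ≠ k)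
    (k, ((w :: ws).length : Int) - (rest.length : Int)) :: first_letter_frequency_alt rest
termination_by l => l.length
decreasing_by
  have hw : (decide (PySem.Str.slice w none (some 1) ≠ PySem.Str.slice w none (some 1))) = false := by
    simp
  simp only [List.filter_cons, hw, List.length_cons]
  exact Nat.lt_succ_of_le (List.length_filter_le _ _)

-- ===== PRECONDITION & SPEC =====
def Spec_first_letter_frequency (words_lst : List String) (out : List (String × Int)) : Prop := out = first_letter_frequency_alt words_lst
instance (words_lst : List String) (out : List (String × Int)) : Decidable (Spec_first_letter_frequency words_lst out) := by unfold Spec_first_letter_frequency; infer_instance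

-- ===== CLAIM (what is proved, stated in full; the proofs are below) =====
def Claim_equal_first_letter_frequency : Prop := ∀ (words_lst : List String), Dom_first_letter_frequency words_lst → Spec_first_letter_frequency words_lst (first_letter_frequency words_lst)

-- ===== LEMMAS AND PROOFS =====

-- A's loop body is exactly the Counter step d.modify x 0 (·+1)
lemma flf_step (d : PySem.Dict String Int) (k : String) :
    (if d.contains k then d.modify k 0 (· + 1) else d.insert k 1) = d.modify k 0 (· + 1) := by
  by_cases h : d.contains k
  · simp [h]
  · simp only [Bool.not_eq_true] at h
    simp [h, PySem.Dict.modify, PySem.Dict.getD_of_not_contains _ _ h]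

-- membership in a PySem.Set is preserved by add
lemma flf_mem_add {x y : String} (s : PySem.Set String) (h : x ∈ s) : x ∈ PySem.Set.add s y := by
  unfold PySem.Set.add
  split <;> simp [h]

-- folding add over a list ignores occurrences of an element already in the accumulator
lemma flf_foldl_add_filter (x : String) :
    ∀ (l : List String) (acc : PySem.Set String), x ∈ acc →
      l.foldl PySem.Set.add acc = (l.filter (fun y => y ≠ x)).foldl PySem.Set.add acc := by
  intro l
  induction l with
  | nil => intro acc _; rfl
  | cons y t ih =>
    intro acc hx
    by_cases hyx : y = x
    · subst hyx
      have : PySem.Set.add acc y = acc := by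
        unfold PySem.Set.add
        simp [PySem.Set.contains, hx]
      simp [List.foldl_cons, this, ih acc hx]
    · simp [hyx, List.foldl_cons, ih (PySem.Set.add acc y) (flf_mem_add acc hx)]

-- folding add keeps an accumulator head in front when the head never recurs in the list
lemma flf_foldl_add_cons (x : String) :
    ∀ (l : List String) (acc : PySem.Set String), x ∉ l →
      l.foldl PySem.Set.add (x :: acc) = x :: l.foldl PySem.Set.add acc := by
  intro l
  induction l with
  | nil => intro acc _; rfl
  | cons y t ih =>
    intro acc hx
    have hyx : ¬ (y = x) := fun h => hx (by simp [h])
    have hadd : PySem.Set.add (x :: acc) y = x :: PySem.Set.add acc y := by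
      simp only [PySem.Set.add, PySem.Set.contains]
      by_cases hy : y ∈ acc
      · simp [hy]
      · simp [hy, hyx]
    rw [List.foldl_cons, hadd, List.foldl_cons,
        ih (PySem.Set.add acc y) (fun h => hx (List.mem_cons_of_mem _ h))]

-- Python's ordered set of a cons: head first, then the set of the tail with the head removed
lemma flf_ofList_cons (x : String) (t : List String) :
    PySem.Set.ofList (x :: t) = x :: PySem.Set.ofList (t.filter (fun y => y ≠ x)) := by
  unfold PySem.Set.ofList
  rw [List.foldl_cons]
  have h1 : PySem.Set.add PySem.Set.empty x = [x] := rfl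
  rw [h1, flf_foldl_add_filter x t [x] (by simp)]
  exact flf_foldl_add_cons x _ [] (by simp [List.mem_filter])

-- a list's length splits into the count of x and the length after filtering x away
lemma flf_length_split (x : String) (l : List String) :
    l.length = l.count x + (l.filter (fun y => y ≠ x)).length := by
  induction l with
  | nil => rfl
  | cons y t ih =>
    by_cases h : y = x
    · subst h; simp [ih]; omega
    · simp [h, ih]; omega

-- pushing the map of first letters through the filter that drops one letter's group
lemma flf_map_filter (F : String → String) (k : String) (t : List String) :
    (t.filter (fun v => F v ≠ k)).map F = (t.map F).filter (fun y => y ≠ k) := by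
  induction t with
  | nil => rfl
  | cons a t ih =>
    simp only [List.filter_cons, List.map_cons]
    by_cases ha : F a = k
    · rw [if_neg (by simp [ha]), if_neg (by simp [ha]), ih]
    · rw [if_pos (by simp [ha]), List.map_cons, if_pos (by simp [ha]), ih]

-- the key lemma: Counter items over the first letters equal B's recursive partition
lemma flf_key : ∀ (n : Nat) (l : List String), l.length ≤ n →
    (PySem.Set.ofList (l.map (fun w => PySem.Str.slice w none (some 1)))).map
        (fun k => (k, (List.count k (l.map (fun w => PySem.Str.slice w none (some 1))) : Int)))
      = first_letter_frequency_alt l := by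
  intro n
  induction n with
  | zero =>
    intro l hl
    have h0 : l = [] := List.eq_nil_of_length_eq_zero (Nat.le_zero.mp hl)
    subst h0
    simp [first_letter_frequency_alt, PySem.Set.ofList]
  | succ m ih =>
    intro l hl
    match l with
    | [] => simp [first_letter_frequency_alt, PySem.Set.ofList]
    | w :: ws =>
      have hlen : ws.length ≤ m := by simpa using hl
      rw [first_letter_frequency_alt]
      have hrest : ((w :: ws).filter
            (fun v => PySem.Str.slice v none (some 1) ≠ PySem.Str.slice w none (some 1)))
          = ws.filter (fun v => PySem.Str.slice v none (some 1) ≠ PySem.Str.slice w none (some 1)) := by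
        simp
      rw [hrest]
      rw [List.map_cons, flf_ofList_cons, List.map_cons]
      congr 1
      · -- head entry: count of the head letter = length minus what survives the filter
        have hsplit := flf_length_split (PySem.Str.slice w none (some 1))
          (ws.map (fun w => PySem.Str.slice w none (some 1)))
        have hfl : ((ws.map (fun w => PySem.Str.slice w none (some 1))).filter
              (fun y => y ≠ PySem.Str.slice w none (some 1))).length
            = (ws.filter (fun v => PySem.Str.slice v none (some 1) ≠ PySem.Str.slice w none (some 1))).length := by
          rw [← flf_map_filter (fun w => PySem.Str.slice w none (some 1)), List.length_map]
        rw [hfl] at hsplit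
        simp only [List.length_map] at hsplit
        simp only [Prod.mk.injEq, true_and, List.length_cons, List.count_cons_self]
        omega
      · -- tail entries: counts restrict to the remainder, then the induction hypothesis applies
        have harg : ((ws.map (fun w => PySem.Str.slice w none (some 1))).filter
              (fun y => y ≠ PySem.Str.slice w none (some 1)))
            = (ws.filter (fun v => PySem.Str.slice v none (some 1) ≠ PySem.Str.slice w none (some 1))).map
                (fun w => PySem.Str.slice w none (some 1)) :=
          (flf_map_filter (fun w => PySem.Str.slice w none (some 1)) _ _).symm
        rw [harg]
        have hcount : ∀ k' ∈ PySem.Set.ofList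
            ((ws.filter (fun v => PySem.Str.slice v none (some 1) ≠ PySem.Str.slice w none (some 1))).map
              (fun w => PySem.Str.slice w none (some 1))),
            (k', (List.count k'
                (PySem.Str.slice w none (some 1) :: ws.map (fun w => PySem.Str.slice w none (some 1))) : Int))
              = (k', (List.count k'
                  ((ws.filter (fun v => PySem.Str.slice v none (some 1) ≠ PySem.Str.slice w none (some 1))).map
                    (fun w => PySem.Str.slice w none (some 1))) : Int)) := by
          intro k' hk'
          have hk'mem : k' ∈ ((ws.map (fun w => PySem.Str.slice w none (some 1))).filter
              (fun y => y ≠ PySem.Str.slice w none (some 1))) := by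
            rw [harg]
            exact (PySem.Set.mem_ofList _ _).mp hk'
          have hk'ne : k' ≠ PySem.Str.slice w none (some 1) := by
            have := (List.mem_filter.mp hk'mem).2
            simpa using this
          have h1 : List.count k'
              (PySem.Str.slice w none (some 1) :: ws.map (fun w => PySem.Str.slice w none (some 1)))
              = List.count k' (ws.map (fun w => PySem.Str.slice w none (some 1))) := by
            rw [List.count_cons]
            simp [Ne.symm hk'ne]
          have h2 : List.count k' ((ws.map (fun w => PySem.Str.slice w none (some 1))).filter
                (fun y => y ≠ PySem.Str.slice w none (some 1)))
              = List.count k' (ws.map (fun w => PySem.Str.slice w none (some 1))) :=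
            List.count_filter (by simpa using hk'ne)
          rw [← harg, h1, h2]
        rw [List.map_congr_left hcount]
        exact ih (ws.filter (fun v => PySem.Str.slice v none (some 1) ≠ PySem.Str.slice w none (some 1)))
          (le_trans (List.length_filter_le _ _) hlen)

-- ===== VERDICT (by name: the statement is the Claim_ definition above) =====
theorem first_letter_frequency_spec : Claim_equal_first_letter_frequency := by
  intro words_lst _
  unfold Spec_first_letter_frequency first_letter_frequency
  simp only [flf_step]
  rw [show (List.foldl (fun (d : PySem.Dict String Int) word => d.modify (PySem.Str.slice word none (some 1)) 0 (· + 1)) PySem.Dict.empty words_lst)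
        = (words_lst.map (fun w => PySem.Str.slice w none (some 1))).foldl (fun d x => d.modify x 0 (· + 1)) PySem.Dict.empty from
      by rw [List.foldl_map]]
  rw [← PySem.Dict.counter_eq_foldl, PySem.Dict.items_counter]
  exact flf_key words_lst.length words_lst (le_refl _)
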